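-- pv_equiv track=rewrite | github.com/yann-rospars/YAKO_server | tools/tools.py | compare_directors
-- ===== SOURCE A (Python) =====
-- import unicodedata
--
-- def normalize_name(name: str) -> str:
--     if not name:
--         return ""
--
--     # Supprime les accents (é → e, ç → c, ă → a, etc.)
--     name = unicodedata.normalize('NFD', name)
--     name = name.encode('ascii', 'ignore').decode('utf-8')
--
--     # Met en minuscules et supprime les espaces superflus
--     name = name.lower().strip()
--
--     return name
--
-- def compare_directors(ac_list, tmdb_list):
--     ac_set   = {normalize_name(n) for n in ac_list if n}
--     tmdb_set = {normalize_name(n) for n in tmdb_list if n}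
--
--     if ac_set == tmdb_set:
--         return 1
--
--     if ac_set.issubset(tmdb_set) or tmdb_set.issubset(ac_set):
--         return 0
--
--     return -5 # il y'a trop de différences
-- ===== SOURCE B (Python) =====
-- import unicodedata
--
-- def normalize_name(name: str) -> str:
--     if not name:
--         return ""
--     name = unicodedata.normalize('NFD', name)
--     name = name.encode('ascii', 'ignore').decode('utf-8')
--     return name.lower().strip()
--
-- def compare_directors(ac_list, tmdb_list):
--     # Sort the two normalized, deduplicated name lists and classify with one
--     # two-pointer merge scan: flag a name unique to either side as we sweep.
--     ac = sorted({normalize_name(n) for n in ac_list if n})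
--     td = sorted({normalize_name(n) for n in tmdb_list if n})
--     only_ac = only_td = False
--     i = j = 0
--     while i < len(ac) and j < len(td):
--         if ac[i] == td[j]:
--             i += 1
--             j += 1
--         elif ac[i] < td[j]:
--             only_ac = True
--             i += 1
--         else:
--             only_td = True
--             j += 1
--     only_ac = only_ac or i < len(ac)
--     only_td = only_td or j < len(td)
--     if only_ac and only_td:
--         return -5
--     if only_ac or only_td:
--         return 0
--     return 1
-- ===== Notes on version B (the rewrite author's own statement) =====
-- stated objective: alternative
-- what changed: B sorts the two normalized deduplicated name lists and decides the verdict by a single two-pointer merge scan that flags names unique to each side, instead of A's hash-set ==/issubset tests.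
import Mathlib
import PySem

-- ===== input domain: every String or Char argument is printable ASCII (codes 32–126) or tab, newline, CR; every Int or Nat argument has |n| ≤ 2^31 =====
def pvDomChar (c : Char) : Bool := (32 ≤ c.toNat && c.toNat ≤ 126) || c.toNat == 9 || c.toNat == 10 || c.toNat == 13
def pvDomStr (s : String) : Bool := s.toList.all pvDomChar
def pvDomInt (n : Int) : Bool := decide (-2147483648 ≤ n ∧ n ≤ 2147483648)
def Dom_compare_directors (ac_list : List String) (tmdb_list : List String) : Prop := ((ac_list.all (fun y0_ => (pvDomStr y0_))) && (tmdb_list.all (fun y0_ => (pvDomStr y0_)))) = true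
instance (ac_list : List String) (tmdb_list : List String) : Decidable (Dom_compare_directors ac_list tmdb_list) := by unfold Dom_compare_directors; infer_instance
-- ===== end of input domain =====

-- B sorts the two normalized deduplicated name lists and decides by one two-pointer
-- merge scan flagging names unique to each side, instead of A's set ==/issubset tests
-- (objective: alternative algorithm, sort-and-merge vs hash-set relations).

-- ===== PORT A =====
-- normalize_name: the NFD + encode('ascii','ignore') step is the identity on the
-- printable-ASCII/tab/newline/CR domain (Dom), so on that domain the function is
-- lower().strip(); exact there.
def pvNormalizeName (name : String) : String :=
  if name = "" then ""
  else PySem.Str.strip (PySem.Str.lower name)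

def compare_directors (ac_list : List String) (tmdb_list : List String) : Int :=
  let ac_set : PySem.Set String :=
    PySem.Set.ofList ((ac_list.filter (fun n => n != "")).map pvNormalizeName)
  let tmdb_set : PySem.Set String :=
    PySem.Set.ofList ((tmdb_list.filter (fun n => n != "")).map pvNormalizeName)
  if PySem.Set.equal ac_set tmdb_set then 1
  else if PySem.Set.issubset ac_set tmdb_set || PySem.Set.issubset tmdb_set ac_set then 0
  else -5

-- ===== PORT B =====
-- the while loop over indices i, j with the two only_* flags, as a recursion on the
-- unscanned suffixes; the two trailing 'only_* or i < len' updates are the base case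
def pvMergeLoop : List String → List String → Bool → Bool → Bool × Bool
  | a :: as, t :: ts, oa, ot =>
      if a = t then pvMergeLoop as ts oa ot
      else if a < t then pvMergeLoop as (t :: ts) true ot
      else pvMergeLoop (a :: as) ts oa true
  | ac, td, oa, ot => (oa || !ac.isEmpty, ot || !td.isEmpty)
termination_by ac td _ _ => ac.length + td.length

def compare_directors_alt (ac_list : List String) (tmdb_list : List String) : Int :=
  let ac : List String :=
    PySem.List.sorted (PySem.Set.ofList ((ac_list.filter (fun n => n != "")).map pvNormalizeName)) (fun x => x) false
  let td : List String :=
    PySem.List.sorted (PySem.Set.ofList ((tmdb_list.filter (fun n => n != "")).map pvNormalizeName)) (fun x => x) false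
  let r := pvMergeLoop ac td false false
  if r.1 && r.2 then -5
  else if r.1 || r.2 then 0
  else 1

-- ===== PRECONDITION & SPEC =====
def Spec_compare_directors (ac_list : List String) (tmdb_list : List String) (out : Int) : Prop := out = compare_directors_alt ac_list tmdb_list
instance (ac_list : List String) (tmdb_list : List String) (out : Int) : Decidable (Spec_compare_directors ac_list tmdb_list out) := by unfold Spec_compare_directors; infer_instance

-- ===== CLAIM (what is proved, stated in full; the proofs are below) =====
def Claim_equal_compare_directors : Prop := ∀ (ac_list : List String) (tmdb_list : List String), Dom_compare_directors ac_list tmdb_list → Spec_compare_directors ac_list tmdb_list (compare_directors ac_list tmdb_list)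

-- ===== LEMMAS AND PROOFS =====

-- dropping a head that the other side's list never contains does not change
-- "some element of t is missing from the other side"
theorem pv_ex_drop_head {t : List String} {x : String} {xs : List String}
    (hx : x ∉ t) : (∃ z ∈ t, z ∉ x :: xs) ↔ (∃ z ∈ t, z ∉ xs) := by
  constructor
  · rintro ⟨z, hz, hzn⟩
    exact ⟨z, hz, fun h => hzn (List.mem_cons_of_mem _ h)⟩
  · rintro ⟨z, hz, hzn⟩
    refine ⟨z, hz, fun h => ?_⟩
    rcases List.mem_cons.mp h with h | h
    · exact hx (h ▸ hz)
    · exact hzn h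

-- cancelling an equal head on both sides (x occurring in neither tail)
theorem pv_ex_cancel_head {x : String} {xs ts : List String}
    (hx : x ∉ xs) : (∃ z ∈ x :: xs, z ∉ x :: ts) ↔ (∃ z ∈ xs, z ∉ ts) := by
  constructor
  · rintro ⟨z, hz, hzn⟩
    rcases List.mem_cons.mp hz with h | h
    · exact absurd (h ▸ List.mem_cons_self) hzn
    · exact ⟨z, h, fun hm => hzn (List.mem_cons_of_mem _ hm)⟩
  · rintro ⟨z, hz, hzn⟩
    refine ⟨z, List.mem_cons_of_mem _ hz, fun h => ?_⟩
    rcases List.mem_cons.mp h with h | h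
    · exact hx (h ▸ hz)
    · exact hzn h

-- the merge scan on strictly sorted lists computes the two "has an element the other
-- side lacks" flags
theorem pv_mergeLoop_spec (a t : List String) (oa ot : Bool)
    (ha : a.Pairwise (· < ·)) (ht : t.Pairwise (· < ·)) :
    pvMergeLoop a t oa ot
      = (oa || decide (∃ x ∈ a, x ∉ t), ot || decide (∃ y ∈ t, y ∉ a)) := by
  fun_induction pvMergeLoop a t oa ot with
  | case1 xs y ys oa ot ih =>
    have hx_notin : y ∉ xs := fun h =>
      lt_irrefl y ((List.pairwise_cons.mp ha).1 y h)
    have hy_notin : y ∉ ys := fun h =>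
      lt_irrefl y ((List.pairwise_cons.mp ht).1 y h)
    rw [ih ha.tail ht.tail]
    congr 1
    · congr 1
      simp only [decide_eq_decide]
      exact (pv_ex_cancel_head hx_notin).symm
    · congr 1
      simp only [decide_eq_decide]
      exact (pv_ex_cancel_head hy_notin).symm
  | case2 x xs y ys oa ot hxy hlt ih =>
    have hy_lt : ∀ z ∈ ys, y < z := (List.pairwise_cons.mp ht).1
    have hxnot : x ∉ y :: ys := by
      intro h
      rcases List.mem_cons.mp h with h | h
      · exact hxy h
      · exact absurd hlt (not_lt_of_gt (hy_lt x h))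
    rw [ih ha.tail ht]
    have hd : decide (∃ z ∈ x :: xs, z ∉ y :: ys) = true :=
      decide_eq_true ⟨x, List.mem_cons_self, hxnot⟩
    have hiff : decide (∃ z ∈ y :: ys, z ∉ x :: xs) = decide (∃ z ∈ y :: ys, z ∉ xs) := by
      simp only [decide_eq_decide]
      exact pv_ex_drop_head hxnot
    rw [hd, hiff, Bool.true_or, Bool.or_true]
  | case3 x xs y ys oa ot hxy hnlt ih =>
    have hgt : y < x := by
      rcases lt_trichotomy x y with h | h | h
      · exact absurd h hnlt
      · exact absurd h hxy
      · exact h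
    have hx_lt : ∀ z ∈ xs, x < z := (List.pairwise_cons.mp ha).1
    have hynot : y ∉ x :: xs := by
      intro h
      rcases List.mem_cons.mp h with h | h
      · exact hxy h.symm
      · exact absurd hgt (not_lt_of_gt (hx_lt y h))
    rw [ih ha ht.tail]
    have hd : decide (∃ z ∈ y :: ys, z ∉ x :: xs) = true :=
      decide_eq_true ⟨y, List.mem_cons_self, hynot⟩
    have hiff : decide (∃ z ∈ x :: xs, z ∉ y :: ys) = decide (∃ z ∈ x :: xs, z ∉ ys) := by
      simp only [decide_eq_decide]
      exact pv_ex_drop_head hynot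
    rw [hd, hiff, Bool.true_or, Bool.or_true]
  | case4 ac td oa ot h =>
    cases ac with
    | nil =>
      cases td with
      | nil => simp
      | cons y ys => simp
    | cons x xs =>
      cases td with
      | nil => simp
      | cons y ys => exact absurd rfl (h x xs y ys rfl)

-- the core equality: A's branch on set relations vs B's branch on the merge flags,
-- for the same underlying collection of normalized names
theorem pv_core (xs ys : List String) :
    (if PySem.Set.equal (PySem.Set.ofList xs) (PySem.Set.ofList ys) then (1 : Int)
     else if PySem.Set.issubset (PySem.Set.ofList xs) (PySem.Set.ofList ys)
            || PySem.Set.issubset (PySem.Set.ofList ys) (PySem.Set.ofList xs) then 0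
     else -5)
    = (let a := PySem.List.sorted (PySem.Set.ofList xs) (fun x => x) false
       let b := PySem.List.sorted (PySem.Set.ofList ys) (fun x => x) false
       let r := pvMergeLoop a b false false
       if r.1 && r.2 then (-5 : Int) else if r.1 || r.2 then 0 else 1) := by
  have ha := PySem.List.sorted_ofList_pairwise_lt (xs := xs)
  have hb := PySem.List.sorted_ofList_pairwise_lt (xs := ys)
  simp only []
  rw [pv_mergeLoop_spec _ _ false false ha hb]
  have hE : PySem.Set.equal (PySem.Set.ofList xs) (PySem.Set.ofList ys) = true
      ↔ ((∀ z ∈ PySem.Set.ofList xs, z ∈ PySem.Set.ofList ys) ∧ ∀ z ∈ PySem.Set.ofList ys, z ∈ PySem.Set.ofList xs) := by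
    rw [PySem.Set.equal_iff]
    constructor
    · intro h; exact ⟨fun z hz => (h z).mp hz, fun z hz => (h z).mpr hz⟩
    · intro ⟨h₁, h₂⟩ z; exact ⟨h₁ z, h₂ z⟩
  have hS1 := PySem.Set.issubset_iff (PySem.Set.ofList xs) (PySem.Set.ofList ys)
  have hS2 := PySem.Set.issubset_iff (PySem.Set.ofList ys) (PySem.Set.ofList xs)
  have hp1 : (∀ z ∈ PySem.Set.ofList xs, z ∈ PySem.Set.ofList ys) ↔ (∀ z ∈ xs, z ∈ ys) := by
    simp [PySem.Set.mem_ofList]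
  have hq1 : (∀ z ∈ PySem.Set.ofList ys, z ∈ PySem.Set.ofList xs) ↔ (∀ z ∈ ys, z ∈ xs) := by
    simp [PySem.Set.mem_ofList]
  by_cases hp : ∀ z ∈ xs, z ∈ ys <;> by_cases hq : ∀ z ∈ ys, z ∈ xs
  · rw [if_pos (hE.mpr ⟨hp1.mpr hp, hq1.mpr hq⟩)]
    have h1 : ¬ ∃ z ∈ xs, z ∉ ys := fun ⟨z, hz, hn⟩ => hn (hp z hz)
    have h2 : ¬ ∃ z ∈ ys, z ∉ xs := fun ⟨z, hz, hn⟩ => hn (hq z hz)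
    simp [h1, h2]
  · rw [if_neg (fun h => hq (hq1.mp (hE.mp h).2)),
        if_pos (by rw [Bool.or_eq_true]; exact Or.inl (hS1.mpr (hp1.mpr hp)))]
    have h1 : ¬ ∃ z ∈ xs, z ∉ ys := fun ⟨z, hz, hn⟩ => hn (hp z hz)
    have h2 : ∃ z ∈ ys, z ∉ xs := by
      by_contra hc
      exact hq (fun z hz => by by_contra hzx; exact hc ⟨z, hz, hzx⟩)
    simp [h1, h2]
  · rw [if_neg (fun h => hp (hp1.mp (hE.mp h).1)),
        if_pos (by rw [Bool.or_eq_true]; exact Or.inr (hS2.mpr (hq1.mpr hq)))]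
    have h1 : ∃ z ∈ xs, z ∉ ys := by
      by_contra hc
      exact hp (fun z hz => by by_contra hzy; exact hc ⟨z, hz, hzy⟩)
    have h2 : ¬ ∃ z ∈ ys, z ∉ xs := fun ⟨z, hz, hn⟩ => hn (hq z hz)
    simp [h1, h2]
  · rw [if_neg (fun h => hp (hp1.mp (hE.mp h).1)),
        if_neg (by
          rw [Bool.or_eq_true]
          rintro (h | h)
          · exact hp (hp1.mp (hS1.mp h))
          · exact hq (hq1.mp (hS2.mp h)))]
    have h1 : ∃ z ∈ xs, z ∉ ys := by
      by_contra hc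
      exact hp (fun z hz => by by_contra hzy; exact hc ⟨z, hz, hzy⟩)
    have h2 : ∃ z ∈ ys, z ∉ xs := by
      by_contra hc
      exact hq (fun z hz => by by_contra hzx; exact hc ⟨z, hz, hzx⟩)
    simp [h1, h2]

-- ===== VERDICT (by name: the statement is the Claim_ definition above) =====
theorem compare_directors_spec : Claim_equal_compare_directors := by
  intro ac tmdb _
  unfold Spec_compare_directors compare_directors compare_directors_alt
  exact pv_core _ _
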